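-- pv_equiv track=rewrite | github.com/radosavlevici210/LifeMemoryTracker | analytics.py | _identify_goals_mentioned
-- ===== SOURCE A (Python) =====
-- def _identify_goals_mentioned(recent_events, memory):
--     """Identify which goals were mentioned in recent entries"""
--     goals = memory.get("goals", [])
--     mentioned_goals = []
--
--     for goal in goals:
--         goal_keywords = goal["goal"].lower().split()[:3]  # First 3 words
--         for event in recent_events:
--             if any(keyword in event["entry"].lower() for keyword in goal_keywords):
--                 mentioned_goals.append(goal["goal"])
--                 break
--
--     return mentioned_goals
-- ===== SOURCE B (Python) =====
-- def _identify_goals_mentioned(recent_events, memory):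
--     """Identify which goals were mentioned in recent entries"""
--     goals = memory.get("goals", [])
--     if not goals:
--         return []
--     blob = "\n".join(event["entry"].lower() for event in recent_events)
--     return [goal["goal"] for goal in goals
--             if any(kw in blob for kw in goal["goal"].lower().split()[:3])]
-- ===== Notes on version B (the rewrite author's own statement) =====
-- stated objective: alternative
-- what changed: Instead of re-lowercasing and rescanning every event entry for each goal, B lowercases all entries once into a single newline-joined blob and tests each goal's keywords against that one string (keywords from split() contain no whitespace, so they cannot match across the newline separators). Pre_ requires every goal dict to carry key 'goal' and, when goals is nonempty, every event to carry key 'entry': outside it A raises KeyError, or returns a value only because its lazy per-goal scan breaks before reaching a malformed event that B's upfront blob-building pass must touch.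
-- outside the precondition, e.g. on _identify_goals_mentioned([{'entry': 'x'}, {}], {'goals': [{'goal': 'x'}]}): A returns ['x'], B raises KeyError
import Mathlib
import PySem

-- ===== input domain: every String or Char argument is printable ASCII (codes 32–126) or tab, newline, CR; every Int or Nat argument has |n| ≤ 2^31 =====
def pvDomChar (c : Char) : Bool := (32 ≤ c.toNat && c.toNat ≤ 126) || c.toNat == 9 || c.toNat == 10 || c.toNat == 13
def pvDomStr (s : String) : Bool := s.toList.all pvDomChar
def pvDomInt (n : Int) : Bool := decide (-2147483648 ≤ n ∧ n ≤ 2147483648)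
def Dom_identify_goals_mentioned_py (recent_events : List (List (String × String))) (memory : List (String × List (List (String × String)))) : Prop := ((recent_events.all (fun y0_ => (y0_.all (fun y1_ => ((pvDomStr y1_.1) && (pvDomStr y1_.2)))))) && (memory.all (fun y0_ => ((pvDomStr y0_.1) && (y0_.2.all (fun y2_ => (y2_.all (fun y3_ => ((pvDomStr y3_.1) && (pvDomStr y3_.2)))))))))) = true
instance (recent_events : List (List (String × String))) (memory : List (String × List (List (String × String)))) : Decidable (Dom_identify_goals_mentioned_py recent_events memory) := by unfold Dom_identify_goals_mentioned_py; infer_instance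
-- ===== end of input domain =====

-- B builds one lowercased newline-joined blob of all entries and tests each goal's keywords
-- against it once, instead of A's per-goal rescan of every event (objective: alternative).
-- Equivalence is proved on Pre_, which admits exactly the inputs where neither Python raises KeyError.

-- d[k] for a Python dict of strings (first match; the KeyError case — key absent — is excluded by Pre_)
def pyGetStr (d : List (String × String)) (k : String) : String :=
  ((PySem.Dict.mk d).get? k).getD ""

-- ===== PORT A =====
-- inner 'for event in recent_events: if any(...): append; break' — the break makes only the first hit matter
def pyScanEvents (kws : List String) (events : List (List (String × String))) : Bool :=
  match events with
  | [] => false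
  | e :: rest =>
      if kws.any (fun kw => PySem.Str.isIn kw (PySem.Str.lower (pyGetStr e "entry"))) then true
      else pyScanEvents kws rest

def identify_goals_mentioned_py (recent_events : List (List (String × String))) (memory : List (String × List (List (String × String)))) : List String :=
  let goals := (PySem.Dict.mk memory).getD "goals" []
  goals.foldl (fun mentioned_goals goal =>
    let goal_keywords := (PySem.Str.split₀ (PySem.Str.lower (pyGetStr goal "goal"))).take 3
    if pyScanEvents goal_keywords recent_events then mentioned_goals ++ [pyGetStr goal "goal"]
    else mentioned_goals) []

-- ===== PORT B =====
def identify_goals_mentioned_py_alt (recent_events : List (List (String × String))) (memory : List (String × List (List (String × String)))) : List String :=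
  let goals := (PySem.Dict.mk memory).getD "goals" []
  if goals.isEmpty then []
  else
    let blob := PySem.Str.join "\n" (recent_events.map (fun event => PySem.Str.lower (pyGetStr event "entry")))
    (goals.filter (fun goal =>
        ((PySem.Str.split₀ (PySem.Str.lower (pyGetStr goal "goal"))).take 3).any
          (fun kw => PySem.Str.isIn kw blob))).map (fun goal => pyGetStr goal "goal")

-- ===== PRECONDITION & SPEC =====
-- Pre_ excludes the inputs on which a goal dict lacks key "goal" or (with goals nonempty) an event
-- dict lacks key "entry": there A raises KeyError, or returns a value only because its lazy per-goal
-- scan breaks before reaching the malformed event that B's upfront blob-building pass must touch.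
def Pre_identify_goals_mentioned_py (recent_events : List (List (String × String))) (memory : List (String × List (List (String × String)))) : Prop :=
  let goals := (PySem.Dict.mk memory).getD "goals" []
  (∀ g ∈ goals, g.any (fun p => p.1 == "goal") = true) ∧
  (goals = [] ∨ ∀ e ∈ recent_events, e.any (fun p => p.1 == "entry") = true)
instance (recent_events : List (List (String × String))) (memory : List (String × List (List (String × String)))) : Decidable (Pre_identify_goals_mentioned_py recent_events memory) := by unfold Pre_identify_goals_mentioned_py; infer_instance

def pvWitness_identify_goals_mentioned_py : (List (List (String × String))) × (List (String × List (List (String × String)))) :=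
  ([[("entry", "Went for a run today")]], [("goals", [[("goal", "Run a marathon")], [("goal", "Learn piano")]])])

def Spec_identify_goals_mentioned_py (recent_events : List (List (String × String))) (memory : List (String × List (List (String × String)))) (out : List String) : Prop := out = identify_goals_mentioned_py_alt recent_events memory
instance (recent_events : List (List (String × String))) (memory : List (String × List (List (String × String)))) (out : List String) : Decidable (Spec_identify_goals_mentioned_py recent_events memory out) := by unfold Spec_identify_goals_mentioned_py; infer_instance

-- ===== CLAIM (what is proved, stated in full; the proofs are below) =====
def Claim_equal_identify_goals_mentioned_py : Prop := ∀ (recent_events : List (List (String × String))) (memory : List (String × List (List (String × String)))), Dom_identify_goals_mentioned_py recent_events memory → Pre_identify_goals_mentioned_py recent_events memory → Spec_identify_goals_mentioned_py recent_events memory (identify_goals_mentioned_py recent_events memory)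

-- ===== LEMMAS AND PROOFS =====

theorem split₀_go_words (s : List Char) : ∀ (cur : List Char) (acc : List (List Char)),
    (∀ a ∈ acc, a ≠ [] ∧ ∀ c ∈ a, PySem.Chars.isspace c = false) →
    (∀ c ∈ cur, PySem.Chars.isspace c = false) →
    ∀ w ∈ PySem.Chars.split₀.go s cur acc, w ≠ [] ∧ ∀ c ∈ w, PySem.Chars.isspace c = false := by
  induction s with
  | nil =>
    intro cur acc hacc hcur w hw
    rw [PySem.Chars.split₀.go] at hw
    by_cases hc : cur.isEmpty
    · simp [hc] at hw; exact hacc w hw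
    · simp [hc] at hw
      rcases hw with h | h
      · exact hacc w h
      · subst h
        constructor
        · simpa [List.isEmpty_iff] using hc
        · intro c hcm; exact hcur c (by simpa using hcm)
  | cons c rest ih =>
    intro cur acc hacc hcur w hw
    rw [PySem.Chars.split₀.go] at hw
    by_cases hs : PySem.Chars.isspace c
    · by_cases hc : cur.isEmpty
      · simp [hs, hc] at hw
        exact ih [] acc hacc (by simp) w hw
      · simp [hs, hc] at hw
        refine ih [] (cur.reverse :: acc) ?_ (by simp) w hw
        intro a ha
        rcases List.mem_cons.mp ha with h | h
        · subst h
          exact ⟨by simpa [List.isEmpty_iff] using hc, fun d hd => hcur d (by simpa using hd)⟩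
        · exact hacc a h
    · simp [hs] at hw
      refine ih (c :: cur) acc hacc ?_ w hw
      intro d hd
      rcases List.mem_cons.mp hd with h | h
      · subst h; simpa using hs
      · exact hcur d h

theorem split₀_words (s : List Char) :
    ∀ w ∈ PySem.Chars.split₀ s, w ≠ [] ∧ ∀ c ∈ w, PySem.Chars.isspace c = false := by
  intro w hw
  exact split₀_go_words s [] [] (by simp) (by simp) w (by simpa [PySem.Chars.split₀] using hw)

theorem infix_append_cons_iff {α : Type} (c : α) (sub l1 l2 : List α) (h : c ∉ sub) :
    sub <:+: (l1 ++ c :: l2) ↔ (sub <:+: l1 ∨ sub <:+: l2) := by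
  constructor
  · rintro ⟨s, t, hst⟩
    by_cases hle : s.length + sub.length ≤ l1.length
    · left
      have h1 : s ++ sub <+: l1 ++ c :: l2 := ⟨t, by simpa [List.append_assoc] using hst⟩
      have h2 : l1 <+: l1 ++ c :: l2 := List.prefix_append _ _
      have h3 : s ++ sub <+: l1 := List.prefix_of_prefix_length_le h1 h2 (by simpa using hle)
      have h4 : sub <:+: s ++ sub := by simpa using List.infix_append s sub []
      exact h4.trans h3.isInfix
    · by_cases hge : l1.length + 1 ≤ s.length
      · right
        have h1 : sub ++ t <:+ l1 ++ c :: l2 := ⟨s, by simpa [List.append_assoc] using hst⟩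
        have h2 : l2 <:+ l1 ++ c :: l2 := ⟨l1 ++ [c], by simp⟩
        have hlen : (sub ++ t).length ≤ l2.length := by
          have h4 := congrArg List.length hst
          simp [List.length_append] at h4 ⊢
          omega
        have h3 : sub ++ t <:+ l2 := List.suffix_of_suffix_length_le h1 h2 hlen
        have h5 : sub <:+: sub ++ t := by simpa using List.infix_append [] sub t
        exact h5.trans h3.isInfix
      · exfalso
        have hidx : (s ++ sub ++ t)[l1.length]? = sub[l1.length - s.length]? := by
          rw [List.append_assoc, List.getElem?_append_right (by omega)]
          rw [List.getElem?_append_left (by omega)]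
        have hidx2 : (l1 ++ c :: l2)[l1.length]? = some c := by
          rw [List.getElem?_append_right (le_refl _)]
          simp
        rw [hst, hidx2] at hidx
        exact h (List.mem_of_getElem? hidx.symm)
  · rintro (h1 | h1)
    · exact h1.trans ⟨[], c :: l2, by simp⟩
    · exact h1.trans ⟨l1 ++ [c], [], by simp⟩

theorem isIn_join (kw : List Char) (hne : kw ≠ []) (hnl : '\n' ∉ kw) :
    ∀ (parts : List (List Char)),
      PySem.Chars.isIn kw (PySem.Chars.join ['\n'] parts) = parts.any (fun p => PySem.Chars.isIn kw p) := by
  intro parts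
  induction parts with
  | nil =>
    simp [PySem.Chars.join, List.intercalate]
    rw [Bool.eq_false_iff]
    intro hc
    exact hne (by simpa using (PySem.Chars.isIn_iff_infix kw []).mp hc)
  | cons p ps ih =>
    cases ps with
    | nil =>
      simp [PySem.Chars.join_singleton]
    | cons q qs =>
      rw [PySem.Chars.join_cons_cons]
      have : PySem.Chars.isIn kw (p ++ ['\n'] ++ PySem.Chars.join ['\n'] (q :: qs))
          = (PySem.Chars.isIn kw p || PySem.Chars.isIn kw (PySem.Chars.join ['\n'] (q :: qs))) := by
        have hiff := infix_append_cons_iff '\n' kw p (PySem.Chars.join ['\n'] (q :: qs)) hnl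
        rcases hb1 : PySem.Chars.isIn kw p with _ | _ <;>
        rcases hb2 : PySem.Chars.isIn kw (PySem.Chars.join ['\n'] (q :: qs)) with _ | _ <;>
        · rw [show p ++ ['\n'] ++ PySem.Chars.join ['\n'] (q :: qs) = p ++ '\n' :: PySem.Chars.join ['\n'] (q :: qs) by simp]
          simp only [Bool.or_self, Bool.or_true, Bool.or_false]
          first
          | (rw [Bool.eq_false_iff]; intro hc
             rcases hiff.mp ((PySem.Chars.isIn_iff_infix _ _).mp hc) with hx | hx
             · exact absurd ((PySem.Chars.isIn_iff_infix _ _).mpr hx) (by simp [hb1])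
             · exact absurd ((PySem.Chars.isIn_iff_infix _ _).mpr hx) (by simp [hb2]))
          | (apply (PySem.Chars.isIn_iff_infix _ _).mpr
             apply hiff.mpr
             first
             | exact Or.inl ((PySem.Chars.isIn_iff_infix _ _).mp hb1)
             | exact Or.inr ((PySem.Chars.isIn_iff_infix _ _).mp hb2))
      rw [this, ih]
      simp

theorem any_any_comm {α β : Type} (l : List α) (m : List β) (f : α → β → Bool) :
    (l.any fun a => m.any (f a)) = m.any (fun b => l.any (fun a => f a b)) := by
  rw [Bool.eq_iff_iff]; simp [List.any_eq_true]; tauto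

theorem pyScanEvents_eq_any (kws : List String) (events : List (List (String × String))) :
    pyScanEvents kws events = events.any (fun e => kws.any (fun kw => PySem.Str.isIn kw (PySem.Str.lower (pyGetStr e "entry")))) := by
  induction events with
  | nil => rfl
  | cons e rest ih =>
    rw [pyScanEvents]
    cases h : kws.any (fun kw => PySem.Str.isIn kw (PySem.Str.lower (pyGetStr e "entry"))) with
    | true => simp only [List.any_cons, h, if_true, Bool.true_or]
    | false => simp only [List.any_cons, h, Bool.false_or]; exact ih

theorem kw_props (s kw : String) (h : kw ∈ (PySem.Str.split₀ s).take 3) :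
    kw.toList ≠ [] ∧ '\n' ∉ kw.toList := by
  have h1 : kw ∈ PySem.Str.split₀ s := List.mem_of_mem_take h
  have h2 : kw.toList ∈ (PySem.Str.split₀ s).map String.toList := List.mem_map_of_mem h1
  rw [PySem.Str.split₀_map_toList] at h2
  obtain ⟨hne, hsp⟩ := split₀_words s.toList kw.toList h2
  refine ⟨hne, fun hc => ?_⟩
  have := hsp '\n' hc
  simp [PySem.Chars.isspace] at this

theorem cond_eq (recent_events : List (List (String × String))) (g : List (String × String)) :
    pyScanEvents ((PySem.Str.split₀ (PySem.Str.lower (pyGetStr g "goal"))).take 3) recent_events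
      = ((PySem.Str.split₀ (PySem.Str.lower (pyGetStr g "goal"))).take 3).any
          (fun kw => PySem.Str.isIn kw (PySem.Str.join "\n" (recent_events.map (fun event => PySem.Str.lower (pyGetStr event "entry"))))) := by
  rw [pyScanEvents_eq_any, any_any_comm]
  apply PySem.List.any_congr_mem
  intro kw hkw
  obtain ⟨hne, hnl⟩ := kw_props _ _ hkw
  show (recent_events.any fun e => PySem.Str.isIn kw (PySem.Str.lower (pyGetStr e "entry"))) = _
  simp only [PySem.Str.isIn, PySem.Str.toList_join, PySem.Str.toList_lower]
  rw [show ("\n" : String).toList = ['\n'] from rfl]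
  rw [List.map_map]
  rw [isIn_join kw.toList hne hnl]
  rw [List.any_map]
  congr 1
  funext e
  simp only [Function.comp_apply, PySem.Str.toList_lower]

theorem foldlA_eq (recent_events : List (List (String × String))) (l : List (List (String × String))) :
    ∀ (a : List String), List.foldl (fun mentioned_goals goal =>
        let goal_keywords := (PySem.Str.split₀ (PySem.Str.lower (pyGetStr goal "goal"))).take 3
        if pyScanEvents goal_keywords recent_events then mentioned_goals ++ [pyGetStr goal "goal"]
        else mentioned_goals) a l
      = a ++ (l.filter (fun goal => pyScanEvents ((PySem.Str.split₀ (PySem.Str.lower (pyGetStr goal "goal"))).take 3) recent_events)).map (fun goal => pyGetStr goal "goal") := by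
  induction l with
  | nil => intro a; simp
  | cons x xs ih =>
    intro a
    rw [List.foldl_cons, List.filter_cons]
    cases h : pyScanEvents ((PySem.Str.split₀ (PySem.Str.lower (pyGetStr x "goal"))).take 3) recent_events with
    | true => simp only [h, if_true, ih, List.map_cons]; simp
    | false => simp only [h, ih]; rfl

theorem main_eq (recent_events : List (List (String × String))) (memory : List (String × List (List (String × String)))) :
    identify_goals_mentioned_py recent_events memory = identify_goals_mentioned_py_alt recent_events memory := by
  have hA : identify_goals_mentioned_py recent_events memory
      = ((((PySem.Dict.mk memory).getD "goals" []).filter (fun goal => pyScanEvents ((PySem.Str.split₀ (PySem.Str.lower (pyGetStr goal "goal"))).take 3) recent_events)).map (fun goal => pyGetStr goal "goal")) := by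
    have h := foldlA_eq recent_events ((PySem.Dict.mk memory).getD "goals" []) []
    rw [List.nil_append] at h
    exact h
  refine hA.trans ?_
  cases hg : (PySem.Dict.mk memory).getD "goals" [] with
  | nil => simp [identify_goals_mentioned_py_alt, hg]
  | cons g gs =>
    simp only [identify_goals_mentioned_py_alt, hg, List.isEmpty_cons, Bool.false_eq_true,
      if_false]
    refine congrArg (List.map _) (List.filter_congr ?_)
    intro x _
    exact cond_eq recent_events x

-- ===== VERDICT (by name: the statement is the Claim_ definition above) =====
theorem identify_goals_mentioned_py_spec : Claim_equal_identify_goals_mentioned_py := by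
  intro recent_events memory _ _
  exact main_eq recent_events memory
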